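-- pv_equiv track=rewrite | github.com/mariosanchez5/Ejercicios_con_Python | Rcaray.py | ranking
-- ===== SOURCE A (Python) =====
-- def ranking(estafados):
--     diccio = {}
--     for tupla in estafados:
--         rut2, monto, empresa, fecha = tupla
--         if empresa in diccio:
--             diccio[empresa] = diccio[empresa] + monto
--         else:
--             diccio[empresa] = monto
--     valores_ord = dict(sorted(diccio.items()))
--     return valores_ord
-- ===== SOURCE B (Python) =====
-- def ranking(estafados):
--     # Sort once by company (stable), then aggregate each contiguous group in a single scan.
--     orden = sorted(estafados, key=lambda tupla: tupla[2])
--     resultado = {}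
--     prev = None
--     total = 0
--     for rut2, monto, empresa, fecha in orden:
--         if prev is None:
--             prev, total = empresa, monto
--         elif empresa == prev:
--             total += monto
--         else:
--             resultado[prev] = total
--             prev, total = empresa, monto
--     if prev is not None:
--         resultado[prev] = total
--     return resultado
-- ===== Notes on version B (the rewrite author's own statement) =====
-- stated objective: alternative
-- what changed: Instead of aggregating into a dict keyed by company and then sorting the dict items, B sorts the input once by company and sums each contiguous group in a single linear scan, so no per-item dict membership tests or final item sort over the aggregate are needed.
import Mathlib
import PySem

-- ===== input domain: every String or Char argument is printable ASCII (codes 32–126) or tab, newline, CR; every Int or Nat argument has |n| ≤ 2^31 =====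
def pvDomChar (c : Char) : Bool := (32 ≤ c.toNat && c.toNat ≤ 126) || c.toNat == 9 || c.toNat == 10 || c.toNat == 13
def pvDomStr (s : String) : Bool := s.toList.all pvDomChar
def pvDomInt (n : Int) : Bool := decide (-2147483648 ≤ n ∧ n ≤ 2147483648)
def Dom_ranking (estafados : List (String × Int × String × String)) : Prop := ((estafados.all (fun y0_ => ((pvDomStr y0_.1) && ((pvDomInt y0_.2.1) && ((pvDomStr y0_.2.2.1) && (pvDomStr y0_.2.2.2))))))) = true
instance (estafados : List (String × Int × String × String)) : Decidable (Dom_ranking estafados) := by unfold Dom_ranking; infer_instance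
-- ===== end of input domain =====

-- B replaces A's dict-then-sort aggregation by a sort-then-linear-group-scan; same return value, proved equal.

-- ===== PORT A =====
def ranking (estafados : List (String × Int × String × String)) : List (String × Int) :=
  let diccio : PySem.Dict String Int :=
    estafados.foldl (fun diccio tupla =>
      if diccio.contains tupla.2.2.1 then
        diccio.insert tupla.2.2.1 ((diccio.get? tupla.2.2.1).getD 0 + tupla.2.1)
      else
        diccio.insert tupla.2.2.1 tupla.2.1) PySem.Dict.empty
  (PySem.Dict.ofList (PySem.List.sorted2 diccio.items (fun p => p.1) (fun p => p.2))).items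

-- ===== PORT B =====
def rankingAltLoop : List (String × Int × String × String) → PySem.Dict String Int → Option String → Int → PySem.Dict String Int
  | [], resultado, prev, total =>
      match prev with
      | none => resultado
      | some p => resultado.insert p total
  | tupla :: rest, resultado, prev, total =>
      match prev with
      | none => rankingAltLoop rest resultado (some tupla.2.2.1) tupla.2.1
      | some p =>
          if tupla.2.2.1 == p then rankingAltLoop rest resultado (some p) (total + tupla.2.1)
          else rankingAltLoop rest (resultado.insert p total) (some tupla.2.2.1) tupla.2.1

def ranking_alt (estafados : List (String × Int × String × String)) : List (String × Int) :=
  (rankingAltLoop (PySem.List.sorted estafados (fun tupla => tupla.2.2.1)) PySem.Dict.empty none 0).items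

-- ===== PRECONDITION & SPEC =====
def Spec_ranking (estafados : List (String × Int × String × String)) (out : List (String × Int)) : Prop := out = ranking_alt estafados
instance (estafados : List (String × Int × String × String)) (out : List (String × Int)) : Decidable (Spec_ranking estafados out) := by unfold Spec_ranking; infer_instance

-- ===== CLAIM (what is proved, stated in full; the proofs are below) =====
def Claim_equal_ranking : Prop := ∀ (estafados : List (String × Int × String × String)), Dom_ranking estafados → Spec_ranking estafados (ranking estafados)

-- ===== LEMMAS AND PROOFS =====

-- proof-side vocabulary
def rkKey (t : String × Int × String × String) : String := t.2.2.1
def rkTot (l : List (String × Int × String × String)) (c : String) : Int :=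
  ((l.filter (fun t => t.2.2.1 == c)).map (fun t => t.2.1)).sum
-- the common normal form both programs are shown to compute
def rkSpec (l : List (String × Int × String × String)) : List (String × Int) :=
  (PySem.List.sorted (PySem.Set.ofList (l.map rkKey)) (fun c => c)).map (fun c => (c, rkTot l c))
-- B's grouping scan with the dict stripped away
def rkFrom : String → Int → List (String × Int × String × String) → List (String × Int)
  | p, total, [] => [(p, total)]
  | p, total, t :: rest =>
      if t.2.2.1 = p then rkFrom p (total + t.2.1) rest
      else (p, total) :: rkFrom t.2.2.1 t.2.1 rest

lemma rkTot_nil (c : String) : rkTot [] c = 0 := rfl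

lemma rkTot_cons (t : String × Int × String × String) (rest : List (String × Int × String × String)) (c : String) :
    rkTot (t :: rest) c = (if t.2.2.1 = c then t.2.1 else 0) + rkTot rest c := by
  by_cases h : t.2.2.1 = c <;> simp [rkTot, h]

lemma rkTot_eq_zero (l : List (String × Int × String × String)) (c : String)
    (h : ∀ t ∈ l, t.2.2.1 ≠ c) : rkTot l c = 0 := by
  induction l with
  | nil => rfl
  | cons t rest ih =>
      rw [rkTot_cons, ih (fun t' ht' => h t' (List.mem_cons_of_mem _ ht'))]
      simp [h t (List.mem_cons_self)]

lemma rkTot_perm (l₁ l₂ : List (String × Int × String × String)) (h : l₁.Perm l₂) (c : String) :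
    rkTot l₁ c = rkTot l₂ c :=
  List.Perm.sum_eq (List.Perm.map _ (List.Perm.filter _ h))

-- Set.ofList facts
lemma foldl_add_sublist {α : Type} [BEq α] :
    ∀ (xs acc ys : List α), acc.Sublist ys →
      (xs.foldl PySem.Set.add acc).Sublist (ys ++ xs)
  | [], acc, ys, h => by simpa using h
  | x :: xs, acc, ys, h => by
    simp only [List.foldl_cons]
    have h2 : (PySem.Set.add acc x).Sublist (ys ++ [x]) := by
      unfold PySem.Set.add
      split
      · exact h.trans (List.sublist_append_left ys [x])
      · exact List.Sublist.append h (List.Sublist.refl [x])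
    simpa [List.append_assoc] using foldl_add_sublist xs (PySem.Set.add acc x) (ys ++ [x]) h2

lemma ofList_sublist {α : Type} [BEq α] (xs : List α) : (PySem.Set.ofList xs).Sublist xs := by
  simpa using foldl_add_sublist xs [] [] (List.Sublist.refl [])

lemma discard_of_not_mem {α : Type} [BEq α] [LawfulBEq α] (s : PySem.Set α) (a : α) (h : a ∉ s) :
    PySem.Set.discard s a = s := by
  unfold PySem.Set.discard
  rw [List.filter_eq_self]
  intro y hy
  have hya : y ≠ a := fun e => h (e ▸ hy)
  simp [hya]

lemma ofList_cons_fresh {α : Type} [BEq α] [LawfulBEq α] (a : α) (xs : List α) (h : a ∉ xs) :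
    PySem.Set.ofList (a :: xs) = a :: PySem.Set.ofList xs := by
  rw [PySem.Set.ofList_cons, discard_of_not_mem]
  rw [PySem.Set.mem_ofList]; exact h

lemma ofList_cons_dup {α : Type} [BEq α] [LawfulBEq α] (a : α) (xs : List α) :
    PySem.Set.ofList (a :: a :: xs) = PySem.Set.ofList (a :: xs) := by
  rw [PySem.Set.ofList_cons, PySem.Set.ofList_cons]
  congr 1
  unfold PySem.Set.discard
  simp [List.filter_filter]

-- insertBy congruence: two comparison functions agreeing on the relevant pairs sort alike
lemma insertBy_congr {α : Type} (b1 b2 : α → α → Bool) (x : α) (acc : List α)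
    (h : ∀ y ∈ acc, b1 x y = b2 x y) :
    PySem.List.insertBy b1 x acc = PySem.List.insertBy b2 x acc := by
  induction acc with
  | nil => rfl
  | cons y ys ih =>
      have hxy := h y List.mem_cons_self
      simp only [PySem.List.insertBy, hxy]
      split
      · rfl
      · rw [ih (fun z hz => h z (List.mem_cons_of_mem _ hz))]

lemma foldl_insertBy_congr {α : Type} (b1 b2 : α → α → Bool) :
    ∀ (xs acc : List α),
      (∀ x ∈ xs, ∀ y, (y ∈ acc ∨ y ∈ xs) → b1 x y = b2 x y) →
      xs.foldl (fun a x => PySem.List.insertBy b1 x a) acc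
        = xs.foldl (fun a x => PySem.List.insertBy b2 x a) acc
  | [], _, _ => rfl
  | x :: xs, acc, h => by
    simp only [List.foldl_cons]
    rw [insertBy_congr b1 b2 x acc (fun y hy => h x List.mem_cons_self y (Or.inl hy))]
    exact foldl_insertBy_congr b1 b2 xs (PySem.List.insertBy b2 x acc) (fun x' hx' y hy => by
      rcases hy with hy | hy
      · rcases (PySem.List.mem_insertBy b2 x y acc).mp hy with rfl | hy
        · exact h x' (List.mem_cons_of_mem _ hx') y (Or.inr List.mem_cons_self)
        · exact h x' (List.mem_cons_of_mem _ hx') y (Or.inl hy)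
      · exact h x' (List.mem_cons_of_mem _ hx') y (Or.inr (List.mem_cons_of_mem _ hy)))

-- on a list of pairs with pairwise-distinct first components, Python's tuple sort is the sort by first component
lemma sorted2_eq_sorted_fst (xs : List (String × Int)) (h : (xs.map Prod.fst).Nodup) :
    PySem.List.sorted2 xs (fun p => p.1) (fun p => p.2)
      = PySem.List.sorted xs (fun p => p.1) := by
  rw [PySem.List.sorted_eq_foldl_insertBy]
  show xs.foldl (fun acc x => PySem.List.insertBy _ x acc) [] = _
  apply foldl_insertBy_congr
  intro x hx y hy
  have hy' : y ∈ xs := by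
    rcases hy with hy | hy
    · exact absurd hy (List.not_mem_nil)
    · exact hy
  by_cases hxy : x = y
  · subst hxy; simp
  · have hne : x.1 ≠ y.1 := fun hfst => hxy (List.inj_on_of_nodup_map h hx hy' hfst)
    rcases lt_trichotomy x.1 y.1 with hlt | heq | hgt
    · simp [hlt]
    · exact absurd heq hne
    · have h1 : ¬ x.1 < y.1 := not_lt_of_gt hgt
      simp [h1, hgt]

-- ===== A-side =====

lemma getD_rankFold :
    ∀ (l : List (String × Int × String × String)) (d : PySem.Dict String Int) (c : String),
      (l.foldl (fun d t => d.insert t.2.2.1 (d.getD t.2.2.1 0 + t.2.1)) d).getD c 0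
        = d.getD c 0 + rkTot l c
  | [], d, c => by simp [rkTot]
  | t :: rest, d, c => by
      simp only [List.foldl_cons]
      rw [getD_rankFold rest _ c, PySem.Dict.getD_insert, rkTot_cons]
      by_cases hc : c = t.2.2.1
      · simp [hc]; ring
      · have hc' : ¬ t.2.2.1 = c := fun hh => hc hh.symm
        simp [hc, hc']

lemma ranking_eq_spec (estafados : List (String × Int × String × String)) :
    ranking estafados = rkSpec estafados := by
  have hcongr :
      estafados.foldl (fun diccio tupla =>
        if diccio.contains tupla.2.2.1 then
          diccio.insert tupla.2.2.1 ((diccio.get? tupla.2.2.1).getD 0 + tupla.2.1)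
        else
          diccio.insert tupla.2.2.1 tupla.2.1) PySem.Dict.empty
      = estafados.foldl (fun d t => d.insert t.2.2.1 (d.getD t.2.2.1 0 + t.2.1)) PySem.Dict.empty := by
    apply PySem.List.foldl_congr_mem
    intro acc t _
    split
    · rw [PySem.Dict.getD_eq_get?_getD]
    · rename_i h
      rw [Bool.not_eq_true] at h
      rw [PySem.Dict.getD_of_not_contains acc 0 h, zero_add]
  unfold ranking
  rw [hcongr]
  set d := estafados.foldl (fun d t => d.insert t.2.2.1 (d.getD t.2.2.1 0 + t.2.1)) PySem.Dict.empty with hd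
  have hkeys : d.keys = PySem.Set.ofList (estafados.map rkKey) := by
    rw [hd, PySem.Dict.keys_foldl_insert_key estafados (fun t => t.2.2.1)
      (fun d t => d.getD t.2.2.1 0 + t.2.1) PySem.Dict.empty, PySem.Dict.keys_empty]
    rfl
  have hnd : d.keys.Nodup := by
    rw [hd]
    exact PySem.Dict.nodup_keys_foldl_insert_key estafados (fun t => t.2.2.1)
      (fun d t => d.getD t.2.2.1 0 + t.2.1) PySem.Dict.empty PySem.Dict.nodup_keys_empty
  have hgetD : ∀ c, d.getD c 0 = rkTot estafados c := by
    intro c; rw [hd, getD_rankFold, PySem.Dict.getD_empty]; ring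
  have hitems : d.items
      = (PySem.Set.ofList (estafados.map rkKey)).map (fun c => (c, rkTot estafados c)) := by
    rw [PySem.Dict.items_eq_map_keys d hnd 0, hkeys]
    exact List.map_congr_left (fun c _ => by rw [hgetD])
  have hpwlt := PySem.List.sorted_ofList_pairwise_lt (estafados.map rkKey)
  have hsorted : PySem.List.sorted d.items (fun p => p.1) = rkSpec estafados := by
    apply PySem.List.sorted_eq_of_perm_of_pairwise_lt
    · rw [hitems]
      exact List.Perm.map _ (PySem.List.sorted_perm _ _ _)
    · unfold rkSpec
      rw [List.pairwise_map]
      exact hpwlt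
  have hfstnodup : (d.items.map Prod.fst).Nodup := hnd
  show (PySem.Dict.ofList (PySem.List.sorted2 d.items (fun p => p.1) (fun p => p.2))).items
      = rkSpec estafados
  rw [sorted2_eq_sorted_fst d.items hfstnodup, hsorted]
  -- dict() of a key-distinct pair list gives back that list
  have hTnodup : ((rkSpec estafados).map Prod.fst).Nodup := by
    unfold rkSpec
    rw [List.map_map]
    simp only [Function.comp_def, List.map_id']
    exact (hpwlt.imp ne_of_lt)
  show ((PySem.Dict.empty : PySem.Dict String Int).update (rkSpec estafados)).items = rkSpec estafados
  unfold PySem.Dict.update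
  rw [PySem.Dict.items_foldl_insert_fresh (rkSpec estafados) Prod.fst Prod.snd PySem.Dict.empty
    (fun a _ => PySem.Dict.contains_empty a.1) hTnodup]
  simp [show (PySem.Dict.empty : PySem.Dict String Int).items = [] from rfl]

-- ===== B-side =====

lemma rankLoop_items :
    ∀ (l : List (String × Int × String × String)) (res : PySem.Dict String Int) (p : String) (total : Int),
      (l.map rkKey).Pairwise (· ≤ ·) →
      (∀ t ∈ l, p ≤ t.2.2.1) →
      res.contains p = false →
      (∀ t ∈ l, res.contains t.2.2.1 = false) →
      (rankingAltLoop l res (some p) total).items = res.items ++ rkFrom p total l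
  | [], res, p, total, _, _, hp, _ => by
      simp [rankingAltLoop, rkFrom, PySem.Dict.items_insert_of_not_contains res total hp]
  | t :: rest, res, p, total, hsort, hmin, hp, hres => by
      rw [List.map_cons] at hsort
      have hpc := List.pairwise_cons.mp hsort
      have hsort' : (rest.map rkKey).Pairwise (· ≤ ·) := hpc.2
      have hhead : ∀ t' ∈ rest, t.2.2.1 ≤ t'.2.2.1 := fun t' ht' =>
        hpc.1 (rkKey t') (List.mem_map_of_mem ht')
      by_cases h : t.2.2.1 = p
      · simp only [rankingAltLoop, rkFrom, h, beq_self_eq_true, if_true]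
        exact rankLoop_items rest res p (total + t.2.1) hsort'
          (fun t' ht' => hmin t' (List.mem_cons_of_mem _ ht')) hp
          (fun t' ht' => hres t' (List.mem_cons_of_mem _ ht'))
      · have hbeq : (t.2.2.1 == p) = false := beq_eq_false_iff_ne.mpr h
        have hplt : p < t.2.2.1 := lt_of_le_of_ne (hmin t List.mem_cons_self) (Ne.symm h)
        simp only [rankingAltLoop, rkFrom, hbeq, h, if_false, Bool.false_eq_true]
        rw [rankLoop_items rest (res.insert p total) t.2.2.1 t.2.1 hsort' hhead
          (by rw [PySem.Dict.contains_insert]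
              simp [h, hres t List.mem_cons_self])
          (fun t' ht' => by
            rw [PySem.Dict.contains_insert]
            have : p < t'.2.2.1 := lt_of_lt_of_le hplt (hhead t' ht')
            simp [ne_of_gt this, hres t' (List.mem_cons_of_mem _ ht')])]
        rw [PySem.Dict.items_insert_of_not_contains res total hp]
        simp

lemma rkFrom_eq :
    ∀ (l : List (String × Int × String × String)) (p : String) (total : Int),
      (l.map rkKey).Pairwise (· ≤ ·) →
      (∀ t ∈ l, p ≤ t.2.2.1) →
      rkFrom p total l
        = (PySem.Set.ofList (p :: l.map rkKey)).map
            (fun c => (c, (if c = p then total else 0) + rkTot l c))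
  | [], p, total, _, _ => by
      rw [show PySem.Set.ofList (p :: List.map rkKey []) = [p] from rfl]
      simp [rkFrom, rkTot_nil]
  | t :: rest, p, total, hsort, hmin => by
      rw [List.map_cons] at hsort
      have hpc := List.pairwise_cons.mp hsort
      have hsort' : (rest.map rkKey).Pairwise (· ≤ ·) := hpc.2
      have hhead : ∀ t' ∈ rest, t.2.2.1 ≤ t'.2.2.1 := fun t' ht' =>
        hpc.1 (rkKey t') (List.mem_map_of_mem ht')
      by_cases h : t.2.2.1 = p
      · simp only [rkFrom, h, if_true]
        rw [rkFrom_eq rest p (total + t.2.1) hsort'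
          (fun t' ht' => h ▸ hhead t' ht')]
        have hdup : PySem.Set.ofList (p :: (t :: rest).map rkKey)
            = PySem.Set.ofList (p :: rest.map rkKey) := by
          show PySem.Set.ofList (p :: rkKey t :: rest.map rkKey) = _
          rw [show rkKey t = p from h, ofList_cons_dup]
        rw [hdup]
        apply List.map_congr_left
        intro c _
        rw [rkTot_cons]
        by_cases hc : c = p
        · simp [hc, h]; ring
        · have hc2 : ¬ t.2.2.1 = c := by rw [h]; exact fun hh => hc hh.symm
          simp [hc, hc2]
      · have hplt : p < t.2.2.1 := lt_of_le_of_ne (hmin t List.mem_cons_self) (Ne.symm h)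
        have hpnotin : p ∉ (t :: rest).map rkKey := by
          intro hmem
          rcases List.mem_map.mp hmem with ⟨t', ht', hkt'⟩
          have : p < rkKey t' := by
            rcases List.mem_cons.mp ht' with rfl | ht'
            · exact hplt
            · exact lt_of_lt_of_le hplt (hhead t' ht')
          exact absurd hkt' (ne_of_gt this)
        simp only [rkFrom, h, if_false]
        rw [rkFrom_eq rest t.2.2.1 t.2.1 hsort' hhead]
        rw [ofList_cons_fresh p _ hpnotin]
        show _ = (fun c => (c, (if c = p then total else 0) + rkTot (t :: rest) c)) p
          :: ((PySem.Set.ofList ((t :: rest).map rkKey)).map _)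
        have hheadval : (fun c => (c, (if c = p then total else 0) + rkTot (t :: rest) c)) p
            = (p, total) := by
          simp
          apply rkTot_eq_zero
          intro t' ht' hk
          exact hpnotin (hk ▸ List.mem_map_of_mem ht')
        rw [hheadval]
        congr 1
        show _ = (PySem.Set.ofList (rkKey t :: rest.map rkKey)).map _
        apply List.map_congr_left
        intro c hc
        have hcmem : c ∈ rkKey t :: rest.map rkKey := (PySem.Set.mem_ofList _ c).mp hc
        have hcp : c ≠ p := by
          intro hceq
          exact hpnotin (hceq ▸ hcmem)
        rw [rkTot_cons]
        by_cases hck : c = t.2.2.1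
        · subst hck
          simp [hcp]
        · have hck2 : ¬ t.2.2.1 = c := fun hh => hck hh.symm
          simp [hcp, hck, hck2]

lemma alt_eq_spec (estafados : List (String × Int × String × String)) :
    ranking_alt estafados = rkSpec estafados := by
  unfold ranking_alt
  have hperm : (PySem.List.sorted estafados (fun t => t.2.2.1)).Perm estafados :=
    PySem.List.sorted_perm estafados (fun t => t.2.2.1) false
  have hpw : ((PySem.List.sorted estafados (fun t => t.2.2.1)).map rkKey).Pairwise (· ≤ ·) := by
    rw [List.pairwise_map]
    exact PySem.List.sorted_pairwise estafados (fun t => t.2.2.1)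
  have hkeysperm : ((PySem.List.sorted estafados (fun t => t.2.2.1)).map rkKey).Perm
      (estafados.map rkKey) := List.Perm.map _ hperm
  have hofl : PySem.Set.ofList ((PySem.List.sorted estafados (fun t => t.2.2.1)).map rkKey)
      = PySem.List.sorted (PySem.Set.ofList (estafados.map rkKey)) (fun c => c) := by
    apply Eq.symm
    apply PySem.List.sorted_eq_of_perm_of_pairwise_lt
    · exact (List.perm_ext_iff_of_nodup (PySem.Set.nodup_ofList _) (PySem.Set.nodup_ofList _)).mpr
        (fun a => by
          rw [PySem.Set.mem_ofList, PySem.Set.mem_ofList]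
          exact ⟨fun ha => hkeysperm.mem_iff.mp ha, fun ha => hkeysperm.mem_iff.mpr ha⟩)
    · have hle : (PySem.Set.ofList ((PySem.List.sorted estafados (fun t => t.2.2.1)).map rkKey)).Pairwise (· ≤ ·) :=
        List.Pairwise.sublist (ofList_sublist _) hpw
      have hne : (PySem.Set.ofList ((PySem.List.sorted estafados (fun t => t.2.2.1)).map rkKey)).Pairwise (· ≠ ·) :=
        PySem.Set.nodup_ofList _
      exact (hle.and hne).imp (fun h => lt_of_le_of_ne h.1 h.2)
  cases horden : PySem.List.sorted estafados (fun t => t.2.2.1) with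
  | nil =>
      have hnil : estafados = [] := (PySem.List.sorted_eq_nil_iff _ _ _).mp horden
      subst hnil
      rfl
  | cons t rest =>
      rw [horden] at hpw hperm hofl
      rw [List.map_cons] at hpw
      have hpc := List.pairwise_cons.mp hpw
      have hsort' : (rest.map rkKey).Pairwise (· ≤ ·) := hpc.2
      have hhead : ∀ t' ∈ rest, t.2.2.1 ≤ t'.2.2.1 := fun t' ht' =>
        hpc.1 (rkKey t') (List.mem_map_of_mem ht')
      show (rankingAltLoop (t :: rest) PySem.Dict.empty none 0).items = rkSpec estafados
      have hloop : rankingAltLoop (t :: rest) PySem.Dict.empty none 0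
          = rankingAltLoop rest PySem.Dict.empty (some t.2.2.1) t.2.1 := rfl
      rw [hloop, rankLoop_items rest PySem.Dict.empty t.2.2.1 t.2.1 hsort' hhead
        (PySem.Dict.contains_empty _) (fun t' _ => PySem.Dict.contains_empty _)]
      rw [rkFrom_eq rest t.2.2.1 t.2.1 hsort' hhead]
      have hkeys : (t.2.2.1 : String) :: rest.map rkKey = (t :: rest).map rkKey := rfl
      rw [hkeys, hofl]
      show PySem.Dict.empty.items ++ _ = _
      rw [show (PySem.Dict.empty : PySem.Dict String Int).items = [] from rfl, List.nil_append]
      unfold rkSpec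
      apply List.map_congr_left
      intro c hc
      have hA : (if c = t.2.2.1 then t.2.1 else 0) + rkTot rest c = rkTot (t :: rest) c := by
        rw [rkTot_cons]
        by_cases hck : c = t.2.2.1
        · subst hck
          simp
        · have hck2 : ¬ t.2.2.1 = c := fun hh => hck hh.symm
          simp [hck, hck2]
      rw [hA, rkTot_perm (t :: rest) estafados hperm c]

-- ===== VERDICT (by name: the statement is the Claim_ definition above) =====
theorem ranking_spec : Claim_equal_ranking := by
  intro estafados _
  show ranking estafados = ranking_alt estafados
  rw [ranking_eq_spec, alt_eq_spec]
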